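-- pv_equiv track=rewrite | github.com/sorryhyun/DiPeO | packages/python/dipeo_domain/src/dipeo_domain/domains/conversation/domain_service.py | _format_upstream_context
-- ===== SOURCE A (Python) =====
-- from typing import TYPE_CHECKING, Any
--
-- def _format_upstream_context(conversation: list[dict[str, Any]]) -> str:
--     """Format upstream conversation as context."""
--     last_exchange = []
--     for msg in reversed(conversation):
--         if msg.get("role") in ["user", "assistant"]:
--             last_exchange.append(msg)
--             if len(last_exchange) == 2:
--                 break
--
--     if not last_exchange:
--         return ""
--
--     context_parts = []
--     for msg in reversed(last_exchange):
--         role = "Input" if msg.get("role") == "user" else "Response"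
--         context_parts.append(f"{role}: {msg.get('content', '')}")
--
--     return "\n".join(context_parts)
-- ===== SOURCE B (Python) =====
-- def _format_upstream_context(conversation: list) -> str:
--     """Format upstream conversation as context."""
--     relevant = [m for m in conversation if m.get("role") in ("user", "assistant")]
--     return "\n".join(
--         f"{'Input' if m.get('role') == 'user' else 'Response'}: {m.get('content', '')}"
--         for m in relevant[-2:]
--     )
-- ===== Notes on version B (the rewrite author's own statement) =====
-- stated objective: simpler
-- what changed: Replaces A's reversed scan with early break, emptiness guard and second reversal loop by a single forward filter, a [-2:] slice (already chronological) and one join over a comprehension.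
import Mathlib
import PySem

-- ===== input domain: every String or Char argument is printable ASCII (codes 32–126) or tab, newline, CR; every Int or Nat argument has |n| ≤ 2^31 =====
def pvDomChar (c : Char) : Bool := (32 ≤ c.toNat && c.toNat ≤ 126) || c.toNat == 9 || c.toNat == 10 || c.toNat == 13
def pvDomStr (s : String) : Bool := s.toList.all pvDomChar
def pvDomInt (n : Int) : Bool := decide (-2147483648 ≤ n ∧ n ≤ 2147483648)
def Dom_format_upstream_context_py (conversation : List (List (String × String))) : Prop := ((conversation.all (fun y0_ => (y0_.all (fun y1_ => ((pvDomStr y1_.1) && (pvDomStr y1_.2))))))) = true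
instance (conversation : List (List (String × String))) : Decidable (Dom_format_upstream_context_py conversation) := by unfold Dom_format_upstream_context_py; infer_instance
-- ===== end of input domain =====

-- B replaces A's reversed scan with early break, emptiness guard and re-reversal loop
-- by a forward filter, a [-2:] slice and one join (objective: simpler).

-- ===== PORT A =====
-- msg.get("role") in ["user", "assistant"]  (dict = assoc list, get = first match)
def pvRoleOk (m : List (String × String)) : Bool :=
  m.lookup "role" == some "user" || m.lookup "role" == some "assistant"

-- f"{role}: {msg.get('content', '')}" with role = "Input" if msg.get("role") == "user" else "Response"
def pvFmtMsg (m : List (String × String)) : String :=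
  (if m.lookup "role" == some "user" then "Input" else "Response") ++ ": " ++
    ((m.lookup "content").getD "")

-- A's first loop: over reversed(conversation), append matching msgs, break at 2
def pvCollectA : List (List (String × String)) → List (List (String × String)) →
    List (List (String × String))
  | [], acc => acc
  | m :: rest, acc =>
    if pvRoleOk m then
      let acc' := acc ++ [m]
      if acc'.length == 2 then acc' else pvCollectA rest acc'
    else pvCollectA rest acc

def format_upstream_context_py (conversation : List (List (String × String))) : String :=
  let last_exchange := pvCollectA conversation.reverse []
  if last_exchange.isEmpty then ""
  else PySem.Str.join "\n" (last_exchange.reverse.map pvFmtMsg)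

-- ===== PORT B =====
def format_upstream_context_py_alt (conversation : List (List (String × String))) : String :=
  let relevant := conversation.filter pvRoleOk
  PySem.Str.join "\n" ((PySem.List.slice relevant (some (-2)) none).map pvFmtMsg)

-- ===== PRECONDITION & SPEC =====
def Spec_format_upstream_context_py (conversation : List (List (String × String))) (out : String) : Prop := out = format_upstream_context_py_alt conversation
instance (conversation : List (List (String × String))) (out : String) : Decidable (Spec_format_upstream_context_py conversation out) := by unfold Spec_format_upstream_context_py; infer_instance

-- ===== CLAIM (what is proved, stated in full; the proofs are below) =====
def Claim_equal_format_upstream_context_py : Prop := ∀ (conversation : List (List (String × String))), Dom_format_upstream_context_py conversation → Spec_format_upstream_context_py conversation (format_upstream_context_py conversation)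

-- ===== LEMMAS AND PROOFS =====

-- A's collecting loop takes the first two matching messages of its input.
theorem pvCollectA_eq (l : List (List (String × String)))
    (acc : List (List (String × String))) (h : acc.length ≤ 1) :
    pvCollectA l acc = (acc ++ l.filter pvRoleOk).take 2 := by
  induction l generalizing acc with
  | nil =>
    simp [pvCollectA, List.take_of_length_le (by omega : acc.length ≤ 2)]
  | cons m rest ih =>
    by_cases hm : pvRoleOk m
    · simp only [pvCollectA, hm, if_true, List.filter_cons]
      by_cases h2 : (acc ++ [m]).length = 2
      · simp only [h2, beq_self_eq_true, if_true]
        rw [show acc ++ m :: List.filter pvRoleOk rest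
              = (acc ++ [m]) ++ List.filter pvRoleOk rest from by simp,
            List.take_append_of_le_length (le_of_eq h2.symm),
            List.take_of_length_le (le_of_eq h2)]
      · have hb : ((acc ++ [m]).length == 2) = false := by simp_all
        simp only [hb]
        rw [ih _ (by simp only [List.length_append, List.length_cons,
              List.length_nil] at h2 ⊢; omega)]
        simp
    · simp [pvCollectA, hm, ih _ h]

theorem take_reverse_eq_drop {α : Type} (r : List α) :
    (r.reverse.take 2).reverse = r.drop (r.length - 2) := by
  rw [List.take_reverse, List.reverse_reverse]

-- ===== VERDICT (by name: the statement is the Claim_ definition above) =====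
theorem format_upstream_context_py_spec : Claim_equal_format_upstream_context_py := by
  intro conversation _
  show format_upstream_context_py conversation = format_upstream_context_py_alt conversation
  simp only [format_upstream_context_py, format_upstream_context_py_alt]
  rw [pvCollectA_eq _ _ (by simp), PySem.List.slice_from_neg_ofNat _ 2 (by omega)]
  simp only [List.nil_append, List.filter_reverse]
  rw [take_reverse_eq_drop]
  by_cases he : (List.filter pvRoleOk conversation).drop
      ((List.filter pvRoleOk conversation).length - 2) = []
  · have hnil : List.filter pvRoleOk conversation = [] := by
      rw [List.drop_eq_nil_iff] at he
      exact List.eq_nil_of_length_eq_zero (by omega)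
    simp [hnil, PySem.Str.join]
  · have hr : List.filter pvRoleOk conversation ≠ [] := by
      intro h; exact he (by simp [h])
    have hb : (((List.filter pvRoleOk conversation).reverse).take 2).isEmpty = false := by
      simp [List.take_eq_nil_iff, hr]
    rw [hb]
    simp
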